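-- pv_equiv track=rewrite | github.com/edwar3je/python-ds-practice | 19_friend_date/friend_date.py | friend_date
-- ===== SOURCE A (Python) =====
-- def friend_date(a, b):
--     """Given two friends, do they have any hobbies in common?
--
--     - a: friend #1, a tuple of (name, age, list-of-hobbies)
--     - b: same, for friend #2
--
--     Returns True if they have any hobbies in common, False is not.
--
--         >>> elmo = ('Elmo', 5, ['hugging', 'being nice'])
--         >>> sauron = ('Sauron', 5000, ['killing hobbits', 'chess'])
--         >>> gandalf = ('Gandalf', 10000, ['waving wands', 'chess'])
--
--         >>> friend_date(elmo, sauron)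
--         False
--
--         >>> friend_date(sauron, gandalf)
--         True
--     """
--
--     #isolate the list from each tuple using index values
--     proto_lst1 = a[2]
--     proto_lst2 = b[2]
--
--     #create sets from each list
--     s1 = {p for p in proto_lst1}
--     s2 = {l for l in proto_lst2}
--
--     #use the intersect operator to determine if there are any common interests
--     inter = s1 & s2
--
--     #run a boolean to determine if inter is empty (no, True, yes, False)
--     if inter == set():
--         return False
--     else:
--         return True
-- ===== SOURCE B (Python) =====
-- def friend_date(a, b):
--     """Do two friends share any hobby? Nested scan over the raw lists, early exit."""
--     for hobby in a[2]:
--         for other in b[2]: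
--             if other == hobby:
--                 return True
--     return False
-- ===== Notes on version B (the rewrite author's own statement) =====
-- stated objective: alternative
-- what changed: Replaces building two sets and testing their intersection for emptiness with a direct nested scan over the two raw hobby lists that returns True on the first match.
import Mathlib
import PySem

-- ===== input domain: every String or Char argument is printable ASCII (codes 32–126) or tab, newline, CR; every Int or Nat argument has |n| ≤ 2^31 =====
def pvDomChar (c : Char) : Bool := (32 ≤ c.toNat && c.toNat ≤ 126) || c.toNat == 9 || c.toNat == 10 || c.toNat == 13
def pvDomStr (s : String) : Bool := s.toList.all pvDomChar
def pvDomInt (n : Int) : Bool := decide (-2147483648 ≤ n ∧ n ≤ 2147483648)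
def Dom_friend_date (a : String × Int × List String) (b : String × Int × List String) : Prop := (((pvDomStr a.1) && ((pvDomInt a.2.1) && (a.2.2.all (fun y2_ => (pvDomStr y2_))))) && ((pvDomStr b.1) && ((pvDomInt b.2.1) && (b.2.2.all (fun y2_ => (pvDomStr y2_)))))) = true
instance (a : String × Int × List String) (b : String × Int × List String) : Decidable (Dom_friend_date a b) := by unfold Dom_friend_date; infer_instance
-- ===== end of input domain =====

-- B replaces A's "build two sets, intersect, test emptiness" with a nested early-exit scan
-- over the raw hobby lists (objective: alternative decomposition, same result).

-- ===== PORT A =====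
def friend_date (a : String × Int × List String) (b : String × Int × List String) : Bool :=
  let proto_lst1 := a.2.2
  let proto_lst2 := b.2.2
  let s1 : PySem.Set String := PySem.Set.ofList proto_lst1
  let s2 : PySem.Set String := PySem.Set.ofList proto_lst2
  let inter := PySem.Set.inter s1 s2
  if PySem.Set.equal inter PySem.Set.empty then false else true

-- ===== PORT B =====
-- inner loop: 'for other in b[2]: if other == hobby: return True'
def fdInner (hobby : String) : List String → Bool
  | [] => false
  | other :: rest => if other == hobby then true else fdInner hobby rest

-- outer loop: 'for hobby in a[2]: …' with early return, then 'return False'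
def fdOuter (ys : List String) : List String → Bool
  | [] => false
  | hobby :: rest => if fdInner hobby ys then true else fdOuter ys rest

def friend_date_alt (a : String × Int × List String) (b : String × Int × List String) : Bool :=
  fdOuter b.2.2 a.2.2

-- ===== PRECONDITION & SPEC =====
def Spec_friend_date (a : String × Int × List String) (b : String × Int × List String) (out : Bool) : Prop := out = friend_date_alt a b
instance (a : String × Int × List String) (b : String × Int × List String) (out : Bool) : Decidable (Spec_friend_date a b out) := by unfold Spec_friend_date; infer_instance

-- ===== CLAIM (what is proved, stated in full; the proofs are below) =====
def Claim_equal_friend_date : Prop := ∀ (a : String × Int × List String) (b : String × Int × List String), Dom_friend_date a b → Spec_friend_date a b (friend_date a b)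

-- ===== LEMMAS AND PROOFS =====

theorem fdInner_eq_mem (h : String) (ys : List String) :
    fdInner h ys = true ↔ h ∈ ys := by
  induction ys with
  | nil => simp [fdInner]
  | cons o rest ih =>
    simp only [fdInner]
    by_cases ho : o = h
    · simp [ho]
    · have : (o == h) = false := by simp [ho]
      simp [this, ih, Ne.symm ho]

theorem fdOuter_eq_exists (ys xs : List String) :
    fdOuter ys xs = true ↔ ∃ x ∈ xs, x ∈ ys := by
  induction xs with
  | nil => simp [fdOuter]
  | cons h rest ih =>
    simp only [fdOuter]
    by_cases hi : fdInner h ys = true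
    · simp [hi, (fdInner_eq_mem h ys).mp hi]
    · have hb : fdInner h ys = false := by simpa using hi
      have hm : h ∉ ys := fun hmem => by simp [(fdInner_eq_mem h ys).mpr hmem] at hb
      simp [hb, ih, hm]

theorem friend_date_eq_exists (a b : String × Int × List String) :
    friend_date a b = true ↔ ∃ x ∈ a.2.2, x ∈ b.2.2 := by
  have hmem : ∀ x, x ∈ PySem.Set.inter (PySem.Set.ofList a.2.2) (PySem.Set.ofList b.2.2) ↔ x ∈ a.2.2 ∧ x ∈ b.2.2 := by
    intro x; rw [PySem.Set.mem_inter, PySem.Set.mem_ofList, PySem.Set.mem_ofList]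
  simp only [friend_date]
  by_cases he : PySem.Set.equal (PySem.Set.inter (PySem.Set.ofList a.2.2) (PySem.Set.ofList b.2.2)) PySem.Set.empty = true
  · rw [if_pos he]
    have hall := (PySem.Set.equal_iff _ _).mp he
    constructor
    · intro hc; exact absurd hc (by simp)
    · rintro ⟨x, hx, hxb⟩
      have hempty := (hall x).mp ((hmem x).mpr ⟨hx, hxb⟩)
      simp [PySem.Set.empty] at hempty
  · rw [if_neg he]
    constructor
    · intro _
      rcases not_forall.mp (fun hall => he ((PySem.Set.equal_iff _ _).mpr hall)) with ⟨x, hx⟩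
      have hxm : x ∈ a.2.2 ∧ x ∈ b.2.2 := by
        rw [← hmem x]
        by_contra hc
        exact hx ⟨fun h => absurd h hc, fun h => absurd h (by simp [PySem.Set.empty])⟩
      exact ⟨x, hxm.1, hxm.2⟩
    · intro _; rfl

-- ===== VERDICT (by name: the statement is the Claim_ definition above) =====
theorem friend_date_spec : Claim_equal_friend_date := by
  intro a b _
  unfold Spec_friend_date friend_date_alt
  by_cases h : ∃ x ∈ a.2.2, x ∈ b.2.2
  · rw [(friend_date_eq_exists a b).mpr h, Eq.comm, fdOuter_eq_exists]
    exact h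
  · have h1 : friend_date a b ≠ true := fun hc => h ((friend_date_eq_exists a b).mp hc)
    have h2 : fdOuter b.2.2 a.2.2 ≠ true := fun hc => h ((fdOuter_eq_exists _ _).mp hc)
    simp at h1 h2
    rw [h1, h2]
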